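-- pv_equiv track=rewrite | github.com/nolistic/genetic-queens | main.py | goodQueens
-- ===== SOURCE A (Python) =====
-- def goodQueens(board):
--     score = 0
--
--     #for every item in the board
--     for i in range(len(board)):
--         isSafe = True
--         # check all other items
--         for j in range(len(board)):
--             if i != j:
--                 # if the rows are not the same
--                 if board[i][0] == board[j][0]:
--                     isSafe = False
--                 #if the columns are not the same
--                 if board[i][1] == board[j][1]:
--                     isSafe = False
--                 #if they are not on a diagonal
--                 if abs(board[i][1] - board[j][1]) == abs(board[i][0] - board[j][0]):
--                     isSafe = False
--
--         #if none of those conditions are met, score++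
--         if isSafe == True:
--             score += 1
--
--     return score
-- ===== SOURCE B (Python) =====
-- def goodQueens(board):
--     # fewer than two queens: no attacks are possible, every queen is safe
--     if len(board) < 2:
--         return len(board)
--     rows = {}
--     cols = {}
--     d1 = {}
--     d2 = {}
--     for q in board:
--         x, y = q[0], q[1]
--         rows[x] = rows.get(x, 0) + 1
--         cols[y] = cols.get(y, 0) + 1
--         d1[x - y] = d1.get(x - y, 0) + 1
--         d2[x + y] = d2.get(x + y, 0) + 1
--     score = 0
--     for q in board:
--         x, y = q[0], q[1]
--         if rows[x] == 1 and cols[y] == 1 and d1[x - y] == 1 and d2[x + y] == 1: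
--             score += 1
--     return score
-- ===== Notes on version B (the rewrite author's own statement) =====
-- stated objective: faster
-- what changed: Replaced the all-pairs O(n^2) scan with one pass building hash counters of rows, columns and both diagonals (with a trivial short-circuit for boards of fewer than two queens), then a second pass marking a queen safe iff all four of its counters equal 1.
import Mathlib
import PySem

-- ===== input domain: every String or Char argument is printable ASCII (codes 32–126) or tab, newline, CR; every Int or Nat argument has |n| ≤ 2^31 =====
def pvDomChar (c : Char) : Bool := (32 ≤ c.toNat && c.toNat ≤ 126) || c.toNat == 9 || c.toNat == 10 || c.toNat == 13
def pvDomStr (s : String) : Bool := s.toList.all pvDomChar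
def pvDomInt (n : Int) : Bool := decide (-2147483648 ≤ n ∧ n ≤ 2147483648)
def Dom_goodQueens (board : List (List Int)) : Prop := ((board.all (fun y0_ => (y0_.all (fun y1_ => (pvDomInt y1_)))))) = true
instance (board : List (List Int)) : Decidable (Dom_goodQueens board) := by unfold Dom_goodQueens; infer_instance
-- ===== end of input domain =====

-- B replaces A's all-pairs scan by counters of rows/columns/diagonals built in one pass (objective: faster; measured).

-- ===== PORT A =====
def goodQueens (board : List (List Int)) : Int :=
  (PySem.List.pyRange 0 (board.length : Int) 1).foldl (fun score i =>
    let isSafe := (PySem.List.pyRange 0 (board.length : Int) 1).foldl (fun isSafe j =>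
      if i ≠ j then
        let isSafe := if PySem.List.pyGetD (PySem.List.pyGetD board i []) 0 0 = PySem.List.pyGetD (PySem.List.pyGetD board j []) 0 0 then false else isSafe
        let isSafe := if PySem.List.pyGetD (PySem.List.pyGetD board i []) 1 0 = PySem.List.pyGetD (PySem.List.pyGetD board j []) 1 0 then false else isSafe
        let isSafe := if (PySem.List.pyGetD (PySem.List.pyGetD board i []) 1 0 - PySem.List.pyGetD (PySem.List.pyGetD board j []) 1 0).natAbs = (PySem.List.pyGetD (PySem.List.pyGetD board i []) 0 0 - PySem.List.pyGetD (PySem.List.pyGetD board j []) 0 0).natAbs then false else isSafe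
        isSafe
      else isSafe) true
    if isSafe = true then score + 1 else score) 0

-- ===== PORT B =====
def goodQueens_alt (board : List (List Int)) : Int :=
  if board.length < 2 then (board.length : Int)
  else
    let ds := board.foldl (fun (acc : PySem.Dict Int Int × PySem.Dict Int Int × PySem.Dict Int Int × PySem.Dict Int Int) q =>
        let x := PySem.List.pyGetD q 0 0
        let y := PySem.List.pyGetD q 1 0
        (acc.1.insert x (acc.1.getD x 0 + 1),
         acc.2.1.insert y (acc.2.1.getD y 0 + 1),
         acc.2.2.1.insert (x - y) (acc.2.2.1.getD (x - y) 0 + 1),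
         acc.2.2.2.insert (x + y) (acc.2.2.2.getD (x + y) 0 + 1)))
      (PySem.Dict.empty, PySem.Dict.empty, PySem.Dict.empty, PySem.Dict.empty)
    board.foldl (fun score q =>
        let x := PySem.List.pyGetD q 0 0
        let y := PySem.List.pyGetD q 1 0
        if ds.1.getD x 0 = 1 ∧ ds.2.1.getD y 0 = 1 ∧ ds.2.2.1.getD (x - y) 0 = 1 ∧ ds.2.2.2.getD (x + y) 0 = 1
        then score + 1 else score) 0

-- ===== PRECONDITION & SPEC =====
-- Pre_ excludes exactly the inputs on which Python A raises IndexError: boards with at least two rows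
-- one of which has fewer than 2 entries (A then indexes that short row).  Boards with fewer than two
-- rows are admitted whatever their rows contain, since A returns there without indexing.
def Pre_goodQueens (board : List (List Int)) : Prop :=
  board.length < 2 ∨ ∀ q ∈ board, 2 ≤ q.length
instance (board : List (List Int)) : Decidable (Pre_goodQueens board) := by unfold Pre_goodQueens; infer_instance
def pvWitness_goodQueens : List (List Int) := [[0, 1], [2, 3], [2, 0]]
def Spec_goodQueens (board : List (List Int)) (out : Int) : Prop := out = goodQueens_alt board
instance (board : List (List Int)) (out : Int) : Decidable (Spec_goodQueens board out) := by unfold Spec_goodQueens; infer_instance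

-- ===== CLAIM (what is proved, stated in full; the proofs are below) =====
def Claim_equal_goodQueens : Prop := ∀ (board : List (List Int)), Dom_goodQueens board → Pre_goodQueens board → Spec_goodQueens board (goodQueens board)


-- ===== LEMMAS AND PROOFS =====

-- coordinate accessors (index-based, as A reads them; value-based keys, as B reads them)
def gqX (board : List (List Int)) (k : Nat) : Int := PySem.List.pyGetD (board.getD k []) 0 0
def gqY (board : List (List Int)) (k : Nat) : Int := PySem.List.pyGetD (board.getD k []) 1 0
def kX (q : List Int) : Int := PySem.List.pyGetD q 0 0
def kY (q : List Int) : Int := PySem.List.pyGetD q 1 0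
def kD1 (q : List Int) : Int := kX q - kY q
def kD2 (q : List Int) : Int := kX q + kY q

theorem kX_eq (q : List Int) : PySem.List.pyGetD q 0 0 = kX q := rfl
theorem kY_eq (q : List Int) : PySem.List.pyGetD q 1 0 = kY q := rfl
theorem kD1_eq (q : List Int) : kX q - kY q = kD1 q := rfl
theorem kD2_eq (q : List Int) : kX q + kY q = kD2 q := rfl

-- A's inner-loop clash test between queens k and j
def gqBad (board : List (List Int)) (k j : Nat) : Bool :=
  decide (gqX board k = gqX board j) || decide (gqY board k = gqY board j)
    || decide ((gqY board k - gqY board j).natAbs = (gqX board k - gqX board j).natAbs)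

-- the per-queen "all four counters are 1" test of B
def gqOk (board : List (List Int)) (q : List Int) : Bool :=
  decide ((board.map kX).count (kX q) = 1 ∧ (board.map kY).count (kY q) = 1
    ∧ (board.map kD1).count (kD1 q) = 1 ∧ (board.map kD2).count (kD2 q) = 1)

-- A's inner loop is "no clash with any other index"
theorem gq_inner (board : List (List Int)) (k : Nat) :
    (List.range board.length).foldl (fun (x : Bool) (j : Nat) =>
      if (k : Int) ≠ (j : Int) then
        if (PySem.List.pyGetD (PySem.List.pyGetD board (k : Int) []) 1 0 -
              PySem.List.pyGetD (PySem.List.pyGetD board (j : Int) []) 1 0).natAbs =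
            (PySem.List.pyGetD (PySem.List.pyGetD board (k : Int) []) 0 0 -
              PySem.List.pyGetD (PySem.List.pyGetD board (j : Int) []) 0 0).natAbs then false
        else
          if PySem.List.pyGetD (PySem.List.pyGetD board (k : Int) []) 1 0 =
              PySem.List.pyGetD (PySem.List.pyGetD board (j : Int) []) 1 0 then false
          else
            if PySem.List.pyGetD (PySem.List.pyGetD board (k : Int) []) 0 0 =
                PySem.List.pyGetD (PySem.List.pyGetD board (j : Int) []) 0 0 then false
            else x
      else x) true
    = !(List.range board.length).any (fun j => decide (k ≠ j) && gqBad board k j) := by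
  have hfun : (fun (x : Bool) (j : Nat) =>
      if (k : Int) ≠ (j : Int) then
        if (PySem.List.pyGetD (PySem.List.pyGetD board (k : Int) []) 1 0 -
              PySem.List.pyGetD (PySem.List.pyGetD board (j : Int) []) 1 0).natAbs =
            (PySem.List.pyGetD (PySem.List.pyGetD board (k : Int) []) 0 0 -
              PySem.List.pyGetD (PySem.List.pyGetD board (j : Int) []) 0 0).natAbs then false
        else
          if PySem.List.pyGetD (PySem.List.pyGetD board (k : Int) []) 1 0 =
              PySem.List.pyGetD (PySem.List.pyGetD board (j : Int) []) 1 0 then false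
          else
            if PySem.List.pyGetD (PySem.List.pyGetD board (k : Int) []) 0 0 =
                PySem.List.pyGetD (PySem.List.pyGetD board (j : Int) []) 0 0 then false
            else x
      else x)
      = (fun ok j => if (decide (k ≠ j) && gqBad board k j) = true then false else ok) := by
    funext ok j
    simp only [gqBad, gqX, gqY, PySem.List.pyGetD_natCast, Ne, Nat.cast_inj]
    by_cases hkj : k = j
    · simp [hkj]
    · simp only [hkj, not_false_iff, if_true]
      split_ifs <;> simp_all
  rw [hfun, PySem.List.foldl_if_false_eq]
  simp

-- A counts the indices with no clash
theorem A_eq (board : List (List Int)) :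
    goodQueens board =
      ((List.range board.length).countP
        (fun k => !(List.range board.length).any (fun j => decide (k ≠ j) && gqBad board k j)) : Int) := by
  unfold goodQueens
  simp only [PySem.List.pyRange_zero_natCast, List.foldl_map]
  refine Eq.trans (PySem.List.foldl_congr_mem _ _
      (fun score k => if (!(List.range board.length).any
        (fun j => decide (k ≠ j) && gqBad board k j)) = true then score + 1 else score) _ ?_) ?_
  · intro acc k _
    rw [gq_inner board k]
  · rw [PySem.List.foldl_if_add_one]
    simp

-- B's counter phase counts the queens whose four counters are all 1
theorem B_eq (board : List (List Int)) (h : ¬ board.length < 2) :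
    goodQueens_alt board = (board.countP (gqOk board) : Int) := by
  unfold goodQueens_alt
  rw [if_neg h]
  rw [PySem.List.foldl_prod_mk
    (f := fun (d : PySem.Dict Int Int) (q : List Int) =>
      d.insert (PySem.List.pyGetD q 0 0) (d.getD (PySem.List.pyGetD q 0 0) 0 + 1))
    (g := fun (s : PySem.Dict Int Int × PySem.Dict Int Int × PySem.Dict Int Int) (q : List Int) =>
      (s.1.insert (PySem.List.pyGetD q 1 0) (s.1.getD (PySem.List.pyGetD q 1 0) 0 + 1),
       s.2.1.insert (PySem.List.pyGetD q 0 0 - PySem.List.pyGetD q 1 0)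
         (s.2.1.getD (PySem.List.pyGetD q 0 0 - PySem.List.pyGetD q 1 0) 0 + 1),
       s.2.2.insert (PySem.List.pyGetD q 0 0 + PySem.List.pyGetD q 1 0)
         (s.2.2.getD (PySem.List.pyGetD q 0 0 + PySem.List.pyGetD q 1 0) 0 + 1)))]
  rw [PySem.List.foldl_prod_mk
    (f := fun (d : PySem.Dict Int Int) (q : List Int) =>
      d.insert (PySem.List.pyGetD q 1 0) (d.getD (PySem.List.pyGetD q 1 0) 0 + 1))
    (g := fun (s : PySem.Dict Int Int × PySem.Dict Int Int) (q : List Int) =>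
      (s.1.insert (PySem.List.pyGetD q 0 0 - PySem.List.pyGetD q 1 0)
         (s.1.getD (PySem.List.pyGetD q 0 0 - PySem.List.pyGetD q 1 0) 0 + 1),
       s.2.insert (PySem.List.pyGetD q 0 0 + PySem.List.pyGetD q 1 0)
         (s.2.getD (PySem.List.pyGetD q 0 0 + PySem.List.pyGetD q 1 0) 0 + 1)))]
  rw [PySem.List.foldl_prod_mk
    (f := fun (d : PySem.Dict Int Int) (q : List Int) =>
      d.insert (PySem.List.pyGetD q 0 0 - PySem.List.pyGetD q 1 0)
        (d.getD (PySem.List.pyGetD q 0 0 - PySem.List.pyGetD q 1 0) 0 + 1))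
    (g := fun (d : PySem.Dict Int Int) (q : List Int) =>
      d.insert (PySem.List.pyGetD q 0 0 + PySem.List.pyGetD q 1 0)
        (d.getD (PySem.List.pyGetD q 0 0 + PySem.List.pyGetD q 1 0) 0 + 1))]
  rw [← List.foldl_map (f := fun (q : List Int) => PySem.List.pyGetD q 0 0)
        (g := fun (d : PySem.Dict Int Int) (x : Int) => d.insert x (d.getD x 0 + 1)),
      ← List.foldl_map (f := fun (q : List Int) => PySem.List.pyGetD q 1 0)
        (g := fun (d : PySem.Dict Int Int) (x : Int) => d.insert x (d.getD x 0 + 1)),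
      ← List.foldl_map (f := fun (q : List Int) => PySem.List.pyGetD q 0 0 - PySem.List.pyGetD q 1 0)
        (g := fun (d : PySem.Dict Int Int) (x : Int) => d.insert x (d.getD x 0 + 1)),
      ← List.foldl_map (f := fun (q : List Int) => PySem.List.pyGetD q 0 0 + PySem.List.pyGetD q 1 0)
        (g := fun (d : PySem.Dict Int Int) (x : Int) => d.insert x (d.getD x 0 + 1))]
  simp only [PySem.Dict.getD_foldl_insert_add_one]
  simp only [PySem.Dict.getD_empty, zero_add]
  simp only [kX_eq, kY_eq, kD1_eq, kD2_eq]
  refine Eq.trans (PySem.List.foldl_congr_mem _ _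
      (fun (score : Int) q => if (gqOk board q) = true then score + 1 else score) _ ?_) ?_
  · intro acc q _
    simp only [gqOk, Nat.cast_eq_one, decide_eq_true_eq]
  · rw [PySem.List.foldl_if_add_one]
    simp

-- a count over the values is a countP over the indices
theorem count_map_eq (board : List (List Int)) (f : List Int → Int) (v : Int) :
    (board.map f).count v =
      (List.range board.length).countP (fun j => decide (f (board.getD j []) = v)) := by
  conv_lhs => rw [← PySem.List.map_pyGetD_pyRange_zero' board []]
  rw [List.count_eq_countP, List.countP_map, List.countP_map,
    PySem.List.pyRange_zero_natCast, List.countP_map]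
  refine List.countP_congr ?_
  intro j _
  simp only [Function.comp_apply, PySem.List.pyGetD_natCast]
  rfl

-- a countP over the queens is a countP over the indices
theorem countP_idx_eq (board : List (List Int)) (p : List Int → Bool) :
    board.countP p = (List.range board.length).countP (fun k => p (board.getD k [])) := by
  conv_lhs => rw [← PySem.List.map_pyGetD_pyRange_zero' board []]
  rw [List.countP_map, PySem.List.pyRange_zero_natCast, List.countP_map]
  refine List.countP_congr ?_
  intro j _
  simp [Function.comp, PySem.List.pyGetD_natCast]

-- countP over range n equals 1, given p k, iff no OTHER index satisfies p
theorem countP_range_eq_one_iff (n k : Nat) (p : Nat → Bool) (hk : k < n) (hpk : p k = true) :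
    (List.range n).countP p = 1 ↔ ∀ j, j < n → j ≠ k → p j = false := by
  have hn : n = k + (1 + (n - (k + 1))) := by omega
  rw [hn, List.range_add, List.countP_append, List.countP_map, List.range_add,
    List.countP_append, List.countP_map, List.range_one]
  simp only [List.countP_cons, List.countP_nil, Function.comp_apply, Nat.add_zero, hpk,
    if_true, Nat.zero_add]
  constructor
  · intro h j hj hjk
    rw [← Bool.not_eq_true]
    intro hpj
    by_cases hlt : j < k
    · have : 0 < (List.range k).countP p := by
        refine List.countP_pos_iff.mpr ⟨j, by simpa using hlt, hpj⟩
      omega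
    · have hno : 0 < (List.range (n - (k + 1))).countP ((p ∘ fun x => k + x) ∘ fun x => 1 + x) := by
        refine List.countP_pos_iff.mpr ⟨j - (k + 1), by simp; omega, ?_⟩
        have hkj' : k + (1 + (j - (k + 1))) = j := by omega
        simpa [Function.comp, hkj'] using hpj
      omega
  · intro h
    have h1 : (List.range k).countP p = 0 := by
      rw [List.countP_eq_zero]
      intro a ha
      simp only [List.mem_range] at ha
      simp [h a (by omega) (by omega)]
    have h2 : (List.range (n - (k + 1))).countP ((p ∘ fun x => k + x) ∘ fun x => 1 + x) = 0 := by
      rw [List.countP_eq_zero]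
      intro a ha
      simp only [List.mem_range] at ha
      simp [Function.comp, h (k + (1 + a)) (by omega) (by omega)]
    omega

-- pointwise: index k is A-safe iff its four value counters are 1
theorem pointwise (board : List (List Int)) (k : Nat) (hk : k < board.length) :
    (!(List.range board.length).any (fun j => decide (k ≠ j) && gqBad board k j))
      = gqOk board (board.getD k []) := by
  rw [Bool.eq_iff_iff]
  simp only [gqOk, decide_eq_true_eq]
  rw [count_map_eq, count_map_eq, count_map_eq, count_map_eq]
  rw [countP_range_eq_one_iff _ k _ hk (by simp),
      countP_range_eq_one_iff _ k _ hk (by simp),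
      countP_range_eq_one_iff _ k _ hk (by simp),
      countP_range_eq_one_iff _ k _ hk (by simp)]
  simp only [Bool.not_eq_true', List.any_eq_false, List.mem_range, gqBad, gqX, gqY,
    kX, kY, kD1, kD2, decide_eq_false_iff_not]
  constructor
  · intro h
    have h' : ∀ j, j < board.length → j ≠ k →
        (¬(PySem.List.pyGetD (board.getD k []) 0 0 = PySem.List.pyGetD (board.getD j []) 0 0) ∧
        ¬(PySem.List.pyGetD (board.getD k []) 1 0 = PySem.List.pyGetD (board.getD j []) 1 0)) ∧
        ¬((PySem.List.pyGetD (board.getD k []) 1 0 - PySem.List.pyGetD (board.getD j []) 1 0).natAbs =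
          (PySem.List.pyGetD (board.getD k []) 0 0 - PySem.List.pyGetD (board.getD j []) 0 0).natAbs) := by
      intro j hj hjk
      have hx := h j hj
      simp only [Bool.and_eq_true, decide_eq_true_eq, Bool.or_eq_true, not_and, not_or] at hx
      exact hx (Ne.symm hjk)
    refine ⟨?_, ?_, ?_, ?_⟩ <;> intro j hj hjk
    · exact fun he => ((h' j hj hjk).1.1 he.symm)
    · exact fun he => ((h' j hj hjk).1.2 he.symm)
    · have h3 := (h' j hj hjk).2
      rw [Int.natAbs_eq_natAbs_iff, not_or] at h3
      omega
    · have h3 := (h' j hj hjk).2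
      rw [Int.natAbs_eq_natAbs_iff, not_or] at h3
      omega
  · rintro ⟨h1, h2, h3, h4⟩ j hj
    simp only [Bool.and_eq_true, decide_eq_true_eq, Bool.or_eq_true, not_and, not_or]
    intro hkj
    have a1 := h1 j hj (Ne.symm hkj)
    have a2 := h2 j hj (Ne.symm hkj)
    have a3 := h3 j hj (Ne.symm hkj)
    have a4 := h4 j hj (Ne.symm hkj)
    refine ⟨⟨fun he => a1 he.symm, fun he => a2 he.symm⟩, ?_⟩
    rw [Int.natAbs_eq_natAbs_iff, not_or]
    constructor <;> omega

-- A equals the counter characterisation on every board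
theorem A_countP (board : List (List Int)) :
    goodQueens board = (board.countP (gqOk board) : Int) := by
  rw [A_eq, countP_idx_eq]
  congr 1
  refine List.countP_congr ?_
  intro k hk
  exact iff_of_eq (congrArg (· = true) (pointwise board k (List.mem_range.mp hk)))

-- ===== VERDICT (by name: the statement is the Claim_ definition above) =====
theorem goodQueens_spec : Claim_equal_goodQueens := by
  intro board _ _
  unfold Spec_goodQueens
  rw [A_countP]
  by_cases h : board.length < 2
  · unfold goodQueens_alt
    rw [if_pos h]
    match board, h with
    | [], _ => simp
    | [q], _ =>
      simp only [List.countP_cons, List.countP_nil, List.length_cons, List.length_nil]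
      have : gqOk [q] q = true := by
        simp [gqOk, kX, kY, kD1, kD2]
      simp [this]
  · rw [B_eq board h]
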